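-- pv_equiv track=rewrite | github.com/IlyaVolvo/google-1gram | hy/description_utils.py | remove_nested_double_braces
-- ===== SOURCE A (Python) =====
-- from typing import Iterable, List, Optional, Union
--
-- def remove_nested_double_braces(text: str) -> str:
--     """Remove all segments enclosed in nested '{{...}}'."""
--     result: List[str] = []
--     depth = 0
--     i = 0
--     n = len(text)
--
--     while i < n:
--         if i + 1 < n and text[i] == "{" and text[i + 1] == "{":
--             depth += 1
--             i += 2
--             continue
--         if i + 1 < n and text[i] == "}" and text[i + 1] == "}":
--             if depth > 0:
--                 depth -= 1
--             i += 2
--             continue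
--         if depth == 0:
--             result.append(text[i])
--         i += 1
--
--     return "".join(result)
-- ===== SOURCE B (Python) =====
-- def remove_nested_double_braces(text: str) -> str:
--     """Remove all segments enclosed in nested '{{...}}'."""
--     out = []
--     depth = 0
--     i = 0
--     a = text.find("{{")
--     b = text.find("}}")
--     while True:
--         if a != -1 and a < i:
--             a = text.find("{{", i)
--         if b != -1 and b < i:
--             b = text.find("}}", i)
--         if a == -1 and b == -1:
--             if depth == 0:
--                 out.append(text[i:])
--             break
--         m = a if a != -1 and (b == -1 or a < b) else b
--         if depth == 0:
--             out.append(text[i:m])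
--         if m == a:
--             depth += 1
--         elif depth > 0:
--             depth -= 1
--         i = m + 2
--     return "".join(out)
-- ===== Notes on version B (the rewrite author's own statement) =====
-- stated objective: faster
-- what changed: Replaced A's per-character interpreter loop by a search-driven scanner: cached str.find results locate the next '{{'/'}}' marker and whole marker-free runs are emitted by slicing, so the Python-level loop runs once per marker instead of once per character.
import Mathlib
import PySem

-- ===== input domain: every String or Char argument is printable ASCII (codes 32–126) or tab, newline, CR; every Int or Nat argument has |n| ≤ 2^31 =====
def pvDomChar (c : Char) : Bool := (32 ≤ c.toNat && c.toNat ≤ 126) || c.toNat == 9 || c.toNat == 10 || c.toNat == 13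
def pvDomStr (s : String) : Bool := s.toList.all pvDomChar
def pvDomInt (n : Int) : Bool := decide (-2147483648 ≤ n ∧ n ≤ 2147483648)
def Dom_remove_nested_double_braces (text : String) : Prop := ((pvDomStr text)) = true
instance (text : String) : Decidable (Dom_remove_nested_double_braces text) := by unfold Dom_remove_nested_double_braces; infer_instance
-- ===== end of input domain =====

-- B replaces A's char-by-char scan by a search-driven scanner (cached str.find jumps between
-- '{{'/'}}' markers, emitting whole runs by slicing); objective: faster on marker-sparse text.

-- ===== PORT A =====
-- A: while-loop over the index; ported as structural recursion over the remaining characters,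
-- with the same depth counter and the same appended-result accumulator.
def pvGoA : List Char → Nat → List Char → List Char
  | [], _, acc => acc
  | [c], depth, acc => if depth = 0 then acc ++ [c] else acc
  | c :: c2 :: rest2, depth, acc =>
    if c = '{' ∧ c2 = '{' then pvGoA rest2 (depth + 1) acc
    else if c = '}' ∧ c2 = '}' then pvGoA rest2 (if depth > 0 then depth - 1 else depth) acc
    else pvGoA (c2 :: rest2) depth (if depth = 0 then acc ++ [c] else acc)

def remove_nested_double_braces (text : String) : String :=
  String.ofList (pvGoA text.toList 0 [])

-- ===== PORT B =====
-- B: 'while True' loop with index i, depth, and the two cached find results; ported with a fuel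
-- guard (fuel = len + 1 always suffices: i advances by at least 2 per iteration) for totality.
def pvGoB : Nat → List Char → Nat → Nat → Int → Int → List Char → List Char
  | 0, _, _, _, _, _, acc => acc
  | fuel + 1, s, i, depth, a0, b0, acc =>
    let a := if a0 ≠ -1 ∧ a0 < (i : Int) then PySem.Chars.findFrom s ['{', '{'] (i : Int) none else a0
    let b := if b0 ≠ -1 ∧ b0 < (i : Int) then PySem.Chars.findFrom s ['}', '}'] (i : Int) none else b0
    if a = -1 ∧ b = -1 then
      if depth = 0 then acc ++ PySem.List.slice s (some (i : Int)) none else acc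
    else
      let m := if a ≠ -1 ∧ (b = -1 ∨ a < b) then a else b
      let acc' := if depth = 0 then acc ++ PySem.List.slice s (some (i : Int)) (some m) else acc
      let depth' := if m = a then depth + 1 else if depth > 0 then depth - 1 else depth
      pvGoB fuel s (m.toNat + 2) depth' a b acc'

def remove_nested_double_braces_alt (text : String) : String :=
  String.ofList (pvGoB (text.toList.length + 1) text.toList 0 0
    (PySem.Chars.find text.toList ['{', '{']) (PySem.Chars.find text.toList ['}', '}']) [])

-- ===== PRECONDITION & SPEC =====
def Spec_remove_nested_double_braces (text : String) (out : String) : Prop := out = remove_nested_double_braces_alt text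
instance (text : String) (out : String) : Decidable (Spec_remove_nested_double_braces text out) := by unfold Spec_remove_nested_double_braces; infer_instance

-- ===== CLAIM (what is proved, stated in full; the proofs are below) =====
def Claim_equal_remove_nested_double_braces : Prop := ∀ (text : String), Dom_remove_nested_double_braces text → Spec_remove_nested_double_braces text (remove_nested_double_braces text)

-- ===== LEMMAS AND PROOFS =====

-- depth update done by A at a '{{' resp. '}}' marker
def pvUpd (u : List Char) (d : Nat) : Nat :=
  if u = ['{', '{'] then d + 1 else if d > 0 then d - 1 else d

lemma pvPrefix_drop_infix {u t : List Char} {j : Nat} (h : u <+: t.drop j) : u <:+: t :=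
  h.isInfix.trans (List.drop_suffix j t).isInfix

-- one single-character step of A when no marker starts at the head
lemma pvGoA_step (c : Char) (rest : List Char) (d : Nat) (acc : List Char)
    (h1 : ¬ ['{', '{'] <+: (c :: rest)) (h2 : ¬ ['}', '}'] <+: (c :: rest)) :
    pvGoA (c :: rest) d acc = pvGoA rest d (if d = 0 then acc ++ [c] else acc) := by
  cases rest with
  | nil => simp [pvGoA]
  | cons c2 r2 =>
    conv_lhs => rw [pvGoA]
    rw [if_neg, if_neg]
    · rintro ⟨rfl, rfl⟩; exact h2 ⟨r2, rfl⟩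
    · rintro ⟨rfl, rfl⟩; exact h1 ⟨r2, rfl⟩

-- A on a marker-free string keeps it (at depth 0) or drops it
lemma pvGoA_no_marker : ∀ (t : List Char) (d : Nat) (acc : List Char),
    ¬ ['{', '{'] <:+: t → ¬ ['}', '}'] <:+: t →
    pvGoA t d acc = if d = 0 then acc ++ t else acc := by
  intro t
  induction t with
  | nil => intro d acc _ _; split_ifs <;> simp [pvGoA]
  | cons c rest ih =>
    intro d acc h1 h2
    rw [pvGoA_step c rest d acc (fun hp => h1 hp.isInfix) (fun hp => h2 hp.isInfix)]
    rw [ih _ _ (fun hin => h1 (List.infix_cons hin)) (fun hin => h2 (List.infix_cons hin))]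
    split_ifs <;> simp

-- A up to (and through) the first marker, at position p
lemma pvGoA_marker (u : List Char) (hu : u = ['{', '{'] ∨ u = ['}', '}']) :
    ∀ (p : Nat) (t : List Char) (d : Nat) (acc : List Char),
      (∀ j, j < p → ¬ ['{', '{'] <+: t.drop j) →
      (∀ j, j < p → ¬ ['}', '}'] <+: t.drop j) →
      u <+: t.drop p →
      pvGoA t d acc = pvGoA (t.drop (p + 2)) (pvUpd u d) (if d = 0 then acc ++ t.take p else acc) := by
  intro p
  induction p with
  | zero =>
    intro t d acc _ _ hp
    rw [List.drop_zero] at hp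
    obtain ⟨r, rfl⟩ := hp
    rcases hu with rfl | rfl <;>
      · simp [pvGoA, pvUpd]
        try (split_ifs <;> simp)
  | succ p ih =>
    intro t d acc h1 h2 hp
    obtain ⟨c, rest, rfl⟩ : ∃ c rest, t = c :: rest := by
      cases t with
      | nil =>
        exfalso
        rw [List.drop_nil] at hp
        rcases hu with rfl | rfl <;> simp [List.prefix_nil] at hp
      | cons c rest => exact ⟨c, rest, rfl⟩
    rw [pvGoA_step c rest d acc (by simpa using h1 0 (Nat.succ_pos p)) (by simpa using h2 0 (Nat.succ_pos p))]
    rw [ih rest d _ (fun j hj => by simpa using h1 (j + 1) (by omega))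
        (fun j hj => by simpa using h2 (j + 1) (by omega)) (by simpa using hp)]
    by_cases hd : d = 0 <;> simp [hd, List.take_succ_cons]

-- find is determined by an occurrence plus minimality
lemma pvFind_eq (t u : List Char) (p : Nat)
    (hocc : u <+: t.drop p) (hmin : ∀ j, j < p → ¬ u <+: t.drop j) :
    PySem.Chars.find t u = (p : Int) := by
  have hinf : u <:+: t := pvPrefix_drop_infix hocc
  have hnn : 0 ≤ PySem.Chars.find t u := (PySem.Chars.find_nonneg_iff t u).mpr hinf
  obtain ⟨h1, h2⟩ := PySem.Chars.find_spec hnn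
  rcases lt_trichotomy (PySem.Chars.find t u).toNat p with h | h | h
  · exact absurd h1 (hmin _ h)
  · omega
  · exact absurd hocc (h2 p h)

-- a cached find result taken at j ≤ i is still the find result at i when it is -1 or ≥ i
lemma pvFindFrom_cache (s u : List Char) (j i : Nat) (hj : j ≤ i) (hi : i ≤ s.length)
    (hc : PySem.Chars.findFrom s u (j : Int) none = -1 ∨ (i : Int) ≤ PySem.Chars.findFrom s u (j : Int) none) :
    PySem.Chars.findFrom s u (i : Int) none = PySem.Chars.findFrom s u (j : Int) none := by
  have hj' : j ≤ s.length := le_trans hj hi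
  rw [PySem.Chars.findFrom_natCast s u j hj'] at hc ⊢
  rw [PySem.Chars.findFrom_natCast s u i hi]
  by_cases h1 : PySem.Chars.find (s.drop j) u = -1
  · rw [if_pos h1, if_pos]
    rw [PySem.Chars.find_eq_neg_one_iff] at h1 ⊢
    intro hin
    apply h1
    have hdd : s.drop i = (s.drop j).drop (i - j) := by
      rw [List.drop_drop]; congr 1; omega
    rw [hdd] at hin
    exact hin.trans (List.drop_suffix _ _).isInfix
  · have hnn : 0 ≤ PySem.Chars.find (s.drop j) u := by
      have := PySem.Chars.neg_one_le_find (s.drop j) u; omega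
    rw [if_neg h1] at hc
    have hle : (i : Int) ≤ (j : Int) + PySem.Chars.find (s.drop j) u := by
      rcases hc with hc | hc
      · exfalso; omega
      · exact hc
    obtain ⟨ho, hm⟩ := PySem.Chars.find_spec (s := s.drop j) (sub := u) hnn
    set f := PySem.Chars.find (s.drop j) u with hf
    have hocc : u <+: (s.drop i).drop (j + f.toNat - i) := by
      have hdd : (s.drop i).drop (j + f.toNat - i) = (s.drop j).drop f.toNat := by
        rw [List.drop_drop, List.drop_drop]; congr 1; omega
      rw [hdd]; exact ho
    have hmin : ∀ k, k < j + f.toNat - i → ¬ u <+: (s.drop i).drop k := by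
      intro k hk
      have hdd : (s.drop i).drop k = (s.drop j).drop (k + (i - j)) := by
        rw [List.drop_drop, List.drop_drop]; congr 1; omega
      rw [hdd]
      exact hm _ (by omega)
    rw [pvFind_eq (s.drop i) u (j + f.toNat - i) hocc hmin]
    rw [if_neg (by omega), if_neg h1]
    omega

-- common tail: after a marker of kind u at absolute position i + p, B's recursive call
-- computes what A computes on the whole remaining string
lemma pvTail (s : List Char) (fuel i d p : Nat) (acc : List Char) (a0 b0 : Int)
    (u : List Char) (hu : u = ['{', '{'] ∨ u = ['}', '}'])
    (ih : ∀ (i d : Nat) (acc : List Char) (a0 b0 : Int),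
      i ≤ s.length → s.length - i < 2 * fuel →
      (∃ j, j ≤ i ∧ a0 = PySem.Chars.findFrom s ['{', '{'] (j : Int) none) →
      (∃ j, j ≤ i ∧ b0 = PySem.Chars.findFrom s ['}', '}'] (j : Int) none) →
      pvGoB fuel s i d a0 b0 acc = pvGoA (s.drop i) d acc)
    (hi : i ≤ s.length) (hf : s.length - i < 2 * (fuel + 1))
    (hocc : u <+: (s.drop i).drop p)
    (hmin1 : ∀ j, j < p → ¬ ['{', '{'] <+: (s.drop i).drop j)
    (hmin2 : ∀ j, j < p → ¬ ['}', '}'] <+: (s.drop i).drop j)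
    (hA : ∃ j, j ≤ i + p + 2 ∧ a0 = PySem.Chars.findFrom s ['{', '{'] (j : Int) none)
    (hB : ∃ j, j ≤ i + p + 2 ∧ b0 = PySem.Chars.findFrom s ['}', '}'] (j : Int) none) :
    pvGoB fuel s (i + p + 2) (pvUpd u d) a0 b0 (if d = 0 then acc ++ (s.drop i).take p else acc)
      = pvGoA (s.drop i) d acc := by
  have hlen : p + 2 ≤ (s.drop i).length := by
    have := hocc.length_le
    have hulen : u.length = 2 := by rcases hu with rfl | rfl <;> rfl
    simp [List.length_drop, hulen] at this ⊢
    omega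
  have hi' : i + p + 2 ≤ s.length := by
    simp [List.length_drop] at hlen
    omega
  rw [ih (i + p + 2) (pvUpd u d) _ a0 b0 hi' (by omega) hA hB]
  rw [pvGoA_marker u hu p (s.drop i) d acc hmin1 hmin2 hocc]
  rw [List.drop_drop, Nat.add_assoc]

-- main equivalence: B's scanner, with valid caches, equals A on the remaining string
lemma pvGoB_eq_pvGoA (s : List Char) :
    ∀ (fuel i d : Nat) (acc : List Char) (a0 b0 : Int),
      i ≤ s.length → s.length - i < 2 * fuel →
      (∃ j, j ≤ i ∧ a0 = PySem.Chars.findFrom s ['{', '{'] (j : Int) none) →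
      (∃ j, j ≤ i ∧ b0 = PySem.Chars.findFrom s ['}', '}'] (j : Int) none) →
      pvGoB fuel s i d a0 b0 acc = pvGoA (s.drop i) d acc := by
  intro fuel
  induction fuel with
  | zero => intro i d acc a0 b0 hi hf _ _; exact absurd hf (by omega)
  | succ fuel ih =>
    intro i d acc a0 b0 hi hf hA hB
    have hcA : (if a0 ≠ -1 ∧ a0 < (i : Int) then PySem.Chars.findFrom s ['{', '{'] (i : Int) none else a0)
        = PySem.Chars.findFrom s ['{', '{'] (i : Int) none := by
      split_ifs with hc
      · rfl
      · obtain ⟨j, hj, rfl⟩ := hA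
        refine (pvFindFrom_cache s _ j i hj hi ?_).symm
        by_cases hz : PySem.Chars.findFrom s ['{', '{'] (j : Int) none = -1
        · exact Or.inl hz
        · right; by_contra hlt; push_neg at hlt; exact hc ⟨hz, by omega⟩
    have hcB : (if b0 ≠ -1 ∧ b0 < (i : Int) then PySem.Chars.findFrom s ['}', '}'] (i : Int) none else b0)
        = PySem.Chars.findFrom s ['}', '}'] (i : Int) none := by
      split_ifs with hc
      · rfl
      · obtain ⟨j, hj, rfl⟩ := hB
        refine (pvFindFrom_cache s _ j i hj hi ?_).symm
        by_cases hz : PySem.Chars.findFrom s ['}', '}'] (j : Int) none = -1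
        · exact Or.inl hz
        · right; by_contra hlt; push_neg at hlt; exact hc ⟨hz, by omega⟩
    simp only [pvGoB]
    rw [hcA, hcB]
    rw [PySem.Chars.findFrom_natCast s ['{', '{'] i hi, PySem.Chars.findFrom_natCast s ['}', '}'] i hi]
    by_cases hfa : PySem.Chars.find (s.drop i) ['{', '{'] = -1 <;>
      by_cases hfb : PySem.Chars.find (s.drop i) ['}', '}'] = -1
    · -- no marker at all
      rw [if_pos ⟨by rw [if_pos hfa], by rw [if_pos hfb]⟩]
      rw [PySem.List.slice_from_natCast]
      rw [pvGoA_no_marker (s.drop i) d acc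
        ((PySem.Chars.find_eq_neg_one_iff _ _).mp hfa)
        ((PySem.Chars.find_eq_neg_one_iff _ _).mp hfb)]
    · -- only '}}' occurs
      have hnnb : 0 ≤ PySem.Chars.find (s.drop i) ['}', '}'] := by
        have := PySem.Chars.neg_one_le_find (s.drop i) ['}', '}']; omega
      obtain ⟨hob, hmb⟩ := PySem.Chars.find_spec (s := s.drop i) (sub := ['}', '}']) hnnb
      rw [if_pos hfa, if_neg hfb]
      rw [if_neg (by rintro ⟨-, h⟩; omega)]
      rw [if_neg (by rintro ⟨h, -⟩; exact h rfl)]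
      rw [if_neg (by omega)]
      set p := (PySem.Chars.find (s.drop i) ['}', '}']).toNat with hp
      have htn : ((i : Int) + PySem.Chars.find (s.drop i) ['}', '}']).toNat = i + p := by omega
      have hsl : PySem.List.slice s (some (i : Int)) (some ((i : Int) + PySem.Chars.find (s.drop i) ['}', '}']))
          = (s.drop i).take p := by
        rw [show ((i : Int) + PySem.Chars.find (s.drop i) ['}', '}']) = ((i : Int) + (p : Int)) by omega]
        exact PySem.List.slice_natCast_add s i p
      rw [htn, hsl]
      have := pvTail s fuel i d p acc (-1) ((i : Int) + PySem.Chars.find (s.drop i) ['}', '}'])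
        ['}', '}'] (Or.inr rfl) ih hi hf hob
        (fun j _ hpre => ((PySem.Chars.find_eq_neg_one_iff _ _).mp hfa) (pvPrefix_drop_infix hpre))
        (fun j hj => hmb j hj)
        (⟨i, by omega, by rw [PySem.Chars.findFrom_natCast s ['{', '{'] i hi, if_pos hfa]⟩)
        (⟨i, by omega, by rw [PySem.Chars.findFrom_natCast s ['}', '}'] i hi, if_neg hfb]⟩)
      simpa [pvUpd] using this
    · -- only '{{' occurs
      have hnna : 0 ≤ PySem.Chars.find (s.drop i) ['{', '{'] := by
        have := PySem.Chars.neg_one_le_find (s.drop i) ['{', '{']; omega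
      obtain ⟨hoa, hma⟩ := PySem.Chars.find_spec (s := s.drop i) (sub := ['{', '{']) hnna
      rw [if_neg hfa, if_pos hfb]
      rw [if_neg (by rintro ⟨h, -⟩; omega)]
      rw [if_pos ⟨by omega, Or.inl rfl⟩]
      rw [if_pos rfl]
      set p := (PySem.Chars.find (s.drop i) ['{', '{']).toNat with hp
      have htn : ((i : Int) + PySem.Chars.find (s.drop i) ['{', '{']).toNat = i + p := by omega
      have hsl : PySem.List.slice s (some (i : Int)) (some ((i : Int) + PySem.Chars.find (s.drop i) ['{', '{']))
          = (s.drop i).take p := by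
        rw [show ((i : Int) + PySem.Chars.find (s.drop i) ['{', '{']) = ((i : Int) + (p : Int)) by omega]
        exact PySem.List.slice_natCast_add s i p
      rw [htn, hsl]
      have := pvTail s fuel i d p acc ((i : Int) + PySem.Chars.find (s.drop i) ['{', '{']) (-1)
        ['{', '{'] (Or.inl rfl) ih hi hf hoa
        (fun j hj => hma j hj)
        (fun j _ hpre => ((PySem.Chars.find_eq_neg_one_iff _ _).mp hfb) (pvPrefix_drop_infix hpre))
        (⟨i, by omega, by rw [PySem.Chars.findFrom_natCast s ['{', '{'] i hi, if_neg hfa]⟩)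
        (⟨i, by omega, by rw [PySem.Chars.findFrom_natCast s ['}', '}'] i hi, if_pos hfb]⟩)
      simpa [pvUpd] using this
    · -- both occur; they cannot start at the same position
      have hnna : 0 ≤ PySem.Chars.find (s.drop i) ['{', '{'] := by
        have := PySem.Chars.neg_one_le_find (s.drop i) ['{', '{']; omega
      have hnnb : 0 ≤ PySem.Chars.find (s.drop i) ['}', '}'] := by
        have := PySem.Chars.neg_one_le_find (s.drop i) ['}', '}']; omega
      obtain ⟨hoa, hma⟩ := PySem.Chars.find_spec (s := s.drop i) (sub := ['{', '{']) hnna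
      obtain ⟨hob, hmb⟩ := PySem.Chars.find_spec (s := s.drop i) (sub := ['}', '}']) hnnb
      have hne : PySem.Chars.find (s.drop i) ['{', '{'] ≠ PySem.Chars.find (s.drop i) ['}', '}'] := by
        intro heq
        obtain ⟨r1, e1⟩ := hoa
        obtain ⟨r2, e2⟩ := hob
        rw [heq] at e1
        rw [← e1] at e2
        simp only [List.cons_append, List.nil_append] at e2
        injection e2 with h1 _
        exact absurd h1 (by decide)
      rw [if_neg hfa, if_neg hfb]
      rw [if_neg (by rintro ⟨h1', h2'⟩; omega)]
      rcases lt_or_gt_of_ne hne with hlt | hgt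
      · -- '{{' first
        rw [if_pos ⟨by omega, Or.inr (by omega)⟩]
        rw [if_pos rfl]
        set p := (PySem.Chars.find (s.drop i) ['{', '{']).toNat with hp
        have htn : ((i : Int) + PySem.Chars.find (s.drop i) ['{', '{']).toNat = i + p := by omega
        have hsl : PySem.List.slice s (some (i : Int)) (some ((i : Int) + PySem.Chars.find (s.drop i) ['{', '{']))
            = (s.drop i).take p := by
          rw [show ((i : Int) + PySem.Chars.find (s.drop i) ['{', '{']) = ((i : Int) + (p : Int)) by omega]
          exact PySem.List.slice_natCast_add s i p
        rw [htn, hsl]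
        have := pvTail s fuel i d p acc
          ((i : Int) + PySem.Chars.find (s.drop i) ['{', '{'])
          ((i : Int) + PySem.Chars.find (s.drop i) ['}', '}'])
          ['{', '{'] (Or.inl rfl) ih hi hf hoa
          (fun j hj => hma j hj)
          (fun j hj => hmb j (by omega))
          (⟨i, by omega, by rw [PySem.Chars.findFrom_natCast s ['{', '{'] i hi, if_neg hfa]⟩)
          (⟨i, by omega, by rw [PySem.Chars.findFrom_natCast s ['}', '}'] i hi, if_neg hfb]⟩)
        simpa [pvUpd] using this
      · -- '}}' first
        rw [if_neg (by rintro ⟨-, h | h⟩ <;> omega)]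
        rw [if_neg (by omega)]
        set p := (PySem.Chars.find (s.drop i) ['}', '}']).toNat with hp
        have htn : ((i : Int) + PySem.Chars.find (s.drop i) ['}', '}']).toNat = i + p := by omega
        have hsl : PySem.List.slice s (some (i : Int)) (some ((i : Int) + PySem.Chars.find (s.drop i) ['}', '}']))
            = (s.drop i).take p := by
          rw [show ((i : Int) + PySem.Chars.find (s.drop i) ['}', '}']) = ((i : Int) + (p : Int)) by omega]
          exact PySem.List.slice_natCast_add s i p
        rw [htn, hsl]
        have := pvTail s fuel i d p acc
          ((i : Int) + PySem.Chars.find (s.drop i) ['{', '{'])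
          ((i : Int) + PySem.Chars.find (s.drop i) ['}', '}'])
          ['}', '}'] (Or.inr rfl) ih hi hf hob
          (fun j hj => hma j (by omega))
          (fun j hj => hmb j hj)
          (⟨i, by omega, by rw [PySem.Chars.findFrom_natCast s ['{', '{'] i hi, if_neg hfa]⟩)
          (⟨i, by omega, by rw [PySem.Chars.findFrom_natCast s ['}', '}'] i hi, if_neg hfb]⟩)
        simpa [pvUpd] using this

-- ===== VERDICT (by name: the statement is the Claim_ definition above) =====
theorem remove_nested_double_braces_spec : Claim_equal_remove_nested_double_braces := by
  intro text _
  unfold Spec_remove_nested_double_braces remove_nested_double_braces remove_nested_double_braces_alt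
  congr 1
  have h := pvGoB_eq_pvGoA text.toList (text.toList.length + 1) 0 0 []
    (PySem.Chars.find text.toList ['{', '{']) (PySem.Chars.find text.toList ['}', '}'])
    (Nat.zero_le _) (by omega)
    ⟨0, le_refl 0, (PySem.Chars.findFrom_zero text.toList ['{', '{']).symm⟩
    ⟨0, le_refl 0, (PySem.Chars.findFrom_zero text.toList ['}', '}']).symm⟩
  rw [List.drop_zero] at h
  exact h.symm
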